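-- pv_equiv track=rewrite | github.com/mborodin/Travel-Plan | importkml.py | buildURL
-- ===== SOURCE A (Python) =====
-- def buildURL(path):
-- 	points = path.copy()
-- 	urls=[]
-- 	origin = points.pop(0)
-- 	url = "http://maps.googleapis.com/maps/api/directions/json?sensor=false&mode=walking&origin=" + str(origin) + "&waypoints=optimize:true"
--
-- 	idx = 0
-- 	while len(points) != 0 and idx != 8:
-- 		pt = points.pop(0)
-- 		idx = idx + 1
-- 		url = url + "|" + str(pt)
--
-- 	if len(points) > 0:
-- 		pt = points[0]
-- 		url = url + "&destination=" + str(pt)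
-- 		urls = urls + buildURL(points)
--
-- 	urls.append(url)
--
-- 	return urls
-- ===== SOURCE B (Python) =====
-- def buildURL(path):
--     points = path.copy()
--     origin = points.pop(0)
--     urls = []
--     while True:
--         url = ("http://maps.googleapis.com/maps/api/directions/json?sensor=false&mode=walking&origin="
--                + str(origin) + "&waypoints=optimize:true")
--         idx = 0
--         while len(points) != 0 and idx != 8:
--             url = url + "|" + str(points.pop(0))
--             idx = idx + 1
--         if len(points) > 0:
--             url = url + "&destination=" + str(points[0])
--             urls.append(url)
--             origin = points.pop(0)
--         else:
--             urls.append(url)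
--             break
--     urls.reverse()
--     return urls
-- ===== Notes on version B (the rewrite author's own statement) =====
-- stated objective: faster
-- what changed: Replaces A's recursion (which rebuilds the urls list via list concatenation at every recursion level) with a single explicit while loop that appends URLs forward and reverses once at the end.
import Mathlib
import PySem

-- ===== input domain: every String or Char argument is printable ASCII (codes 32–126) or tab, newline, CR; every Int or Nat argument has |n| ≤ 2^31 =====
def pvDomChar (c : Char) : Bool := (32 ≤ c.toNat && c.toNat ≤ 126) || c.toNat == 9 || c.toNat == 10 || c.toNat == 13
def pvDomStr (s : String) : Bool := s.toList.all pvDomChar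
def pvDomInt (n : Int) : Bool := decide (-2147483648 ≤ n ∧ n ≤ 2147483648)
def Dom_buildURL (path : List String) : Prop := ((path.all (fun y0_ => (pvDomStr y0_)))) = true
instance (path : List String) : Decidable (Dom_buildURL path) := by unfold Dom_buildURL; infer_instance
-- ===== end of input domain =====

-- B replaces A's recursion by one explicit while loop accumulating URLs forward, reversed once
-- at the end; return values proved equal on non-empty input (both raise IndexError on []).

-- ===== PORT A =====
-- inner `while len(points) != 0 and idx != 8` loop of A: pops up to 8 points, appending "|pt"
def consumeA (url : String) (points : List String) (idx : Nat) : String × List String :=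
  match points with
  | [] => (url, [])
  | pt :: rest =>
    if idx = 8 then (url, pt :: rest)
    else consumeA (url ++ "|" ++ pt) rest (idx + 1)

theorem consumeA_len (url : String) (points : List String) (idx : Nat) :
    (consumeA url points idx).2.length ≤ points.length := by
  induction points generalizing url idx with
  | nil => simp [consumeA]
  | cons pt rest ih =>
    simp only [consumeA]
    split
    · simp
    · exact le_trans (ih _ _) (by simp)

def buildURL (path : List String) : List String :=
  match path with
  | [] => []  -- unreachable under Pre_buildURL: Python raises IndexError here
  | origin :: pts =>
    let r := consumeA ("http://maps.googleapis.com/maps/api/directions/json?sensor=false&mode=walking&origin=" ++ origin ++ "&waypoints=optimize:true") pts 0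
    match h : r.2 with
    | [] => [r.1]
    | pt :: _ => buildURL r.2 ++ [r.1 ++ "&destination=" ++ pt]
termination_by path.length
decreasing_by
  simp only [List.length_cons]
  have := consumeA_len ("http://maps.googleapis.com/maps/api/directions/json?sensor=false&mode=walking&origin=" ++ origin ++ "&waypoints=optimize:true") pts 0
  omega

-- ===== PORT B =====
-- the identical inner `while len(points) != 0 and idx != 8` loop of B
def consumeB (url : String) (points : List String) (idx : Nat) : String × List String :=
  match points with
  | [] => (url, [])
  | pt :: rest =>
    if idx = 8 then (url, pt :: rest)
    else consumeB (url ++ "|" ++ pt) rest (idx + 1)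

theorem consumeB_len (url : String) (points : List String) (idx : Nat) :
    (consumeB url points idx).2.length ≤ points.length := by
  induction points generalizing url idx with
  | nil => simp [consumeB]
  | cons pt rest ih =>
    simp only [consumeB]
    split
    · simp
    · exact le_trans (ih _ _) (by simp)

-- B's outer `while True` loop: urls accumulated forward (Python urls.append)
def loopB (origin : String) (points : List String) (urls : List String) : List String :=
  let r := consumeB ("http://maps.googleapis.com/maps/api/directions/json?sensor=false&mode=walking&origin=" ++ origin ++ "&waypoints=optimize:true") points 0
  match h : r.2 with
  | [] => urls ++ [r.1]
  | pt :: rest' => loopB pt rest' (urls ++ [r.1 ++ "&destination=" ++ pt])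
termination_by points.length
decreasing_by
  have := consumeB_len ("http://maps.googleapis.com/maps/api/directions/json?sensor=false&mode=walking&origin=" ++ origin ++ "&waypoints=optimize:true") points 0
  rw [h] at this
  simp at this
  omega

def buildURL_alt (path : List String) : List String :=
  match path with
  | [] => []  -- unreachable under Pre_buildURL: Python raises IndexError here
  | origin :: pts => (loopB origin pts []).reverse

-- ===== PRECONDITION & SPEC =====
-- Pre_ excludes only the empty list, on which both A and B raise IndexError (points.pop(0)).
def Pre_buildURL (path : List String) : Prop := path ≠ []
instance (path : List String) : Decidable (Pre_buildURL path) := by unfold Pre_buildURL; infer_instance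
def pvWitness_buildURL : List String := ["a", "b"]

def Spec_buildURL (path : List String) (out : List String) : Prop := out = buildURL_alt path
instance (path : List String) (out : List String) : Decidable (Spec_buildURL path out) := by unfold Spec_buildURL; infer_instance

-- ===== CLAIM (what is proved, stated in full; the proofs are below) =====
def Claim_equal_buildURL : Prop := ∀ (path : List String), Dom_buildURL path → Pre_buildURL path → Spec_buildURL path (buildURL path)

-- ===== LEMMAS AND PROOFS =====
theorem consumeB_eq_consumeA (url : String) (points : List String) (idx : Nat) :
    consumeB url points idx = consumeA url points idx := by
  induction points generalizing url idx with
  | nil => simp [consumeA, consumeB]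
  | cons pt rest ih =>
    simp only [consumeA, consumeB]
    split
    · rfl
    · exact ih _ _

theorem loopB_eq (n : Nat) (origin : String) (points : List String) (urls : List String)
    (hn : points.length ≤ n) :
    loopB origin points urls = urls ++ (buildURL (origin :: points)).reverse := by
  induction n generalizing origin points urls with
  | zero =>
    have hp : points = [] := List.length_eq_zero_iff.mp (Nat.le_zero.mp hn)
    subst hp
    simp [loopB, buildURL, consumeB, consumeA]
  | succ n ih =>
    rw [loopB, buildURL]
    split <;> rename_i hB <;>
      rw [consumeB_eq_consumeA] at hB <;> split <;> rename_i hA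
    · simp [consumeB_eq_consumeA]
    · rw [hA] at hB; exact absurd hB (by simp)
    · rw [hA] at hB; exact absurd hB (by simp)
    · rename_i pt rest' pt1 tail
      rw [hA] at hB
      injection hB with h1 h2
      subst h1; subst h2
      have hlen := consumeA_len ("http://maps.googleapis.com/maps/api/directions/json?sensor=false&mode=walking&origin=" ++ origin ++ "&waypoints=optimize:true") points 0
      rw [hA] at hlen
      simp only [List.length_cons] at hlen
      rw [consumeB_eq_consumeA, ih pt1 tail _ (by omega), hA]
      simp

-- ===== VERDICT (by name: the statement is the Claim_ definition above) =====
theorem buildURL_spec : Claim_equal_buildURL := by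
  intro path _ hpre
  unfold Spec_buildURL
  match path with
  | [] => exact absurd rfl hpre
  | origin :: pts =>
    have hb : buildURL_alt (origin :: pts) = (loopB origin pts []).reverse := rfl
    rw [hb, loopB_eq pts.length origin pts [] le_rfl]
    simp
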